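-- pv_equiv track=rewrite | github.com/Aasthaengg/IBMdataset | Python_codes/p03386/s279320816.py | solve
-- ===== SOURCE A (Python) =====
-- def solve(a, b, k):
--     ans = []
--     for i in range(k):
--         if a + i <= b:
--             ans.append(a + i)
--         if b - i >= a:
--             ans.append(b - i)
--     ans = sorted(set(ans))
--     return ans
-- ===== SOURCE B (Python) =====
-- def solve(a, b, k):
--     x = min(a + k - 1, b)   # last index of the low block
--     y = max(b - k + 1, a)   # first index of the high block
--     if y <= x + 1:
--         return list(range(a, b + 1))
--     return list(range(a, x + 1)) + list(range(y, b + 1))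
-- ===== Notes on version B (the rewrite author's own statement) =====
-- stated objective: faster
-- what changed: B replaces A's k-iteration append loop plus set-dedup and sort by closed-form range arithmetic: it computes the end of the low block and the start of the high block and emits one or two ranges directly.
import Mathlib
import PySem

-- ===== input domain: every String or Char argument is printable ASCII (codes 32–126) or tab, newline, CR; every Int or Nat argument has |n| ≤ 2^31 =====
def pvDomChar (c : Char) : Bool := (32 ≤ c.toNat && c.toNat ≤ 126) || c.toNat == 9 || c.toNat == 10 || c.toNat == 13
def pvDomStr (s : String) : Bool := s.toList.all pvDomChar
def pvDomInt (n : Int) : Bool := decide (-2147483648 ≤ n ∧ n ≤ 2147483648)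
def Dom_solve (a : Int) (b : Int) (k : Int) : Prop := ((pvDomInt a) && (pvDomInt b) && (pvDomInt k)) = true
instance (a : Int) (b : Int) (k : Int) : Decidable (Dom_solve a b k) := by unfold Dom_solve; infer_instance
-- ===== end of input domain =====

-- B replaces A's k-step loop + set + sort by closed-form range arithmetic on the two blocks (objective: faster for large k).


-- ===== PORT A =====
def solve (a : Int) (b : Int) (k : Int) : List Int :=
  let ans : List Int := (PySem.List.pyRange 0 k 1).foldl (fun ans i =>
    let ans := if a + i ≤ b then ans ++ [a + i] else ans
    if a ≤ b - i then ans ++ [b - i] else ans) []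
  PySem.List.sorted (PySem.Set.ofList ans) (fun x => x) false

-- ===== PORT B =====
def solve_alt (a : Int) (b : Int) (k : Int) : List Int :=
  let x := min (a + k - 1) b
  let y := max (b - k + 1) a
  if y ≤ x + 1 then PySem.List.pyRange a (b + 1) 1
  else PySem.List.pyRange a (x + 1) 1 ++ PySem.List.pyRange y (b + 1) 1

-- ===== PRECONDITION & SPEC =====
def Spec_solve (a : Int) (b : Int) (k : Int) (out : List Int) : Prop := out = solve_alt a b k
instance (a : Int) (b : Int) (k : Int) (out : List Int) : Decidable (Spec_solve a b k out) := by unfold Spec_solve; infer_instance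

-- ===== CLAIM (what is proved, stated in full; the proofs are below) =====
def Claim_equal_solve : Prop := ∀ (a : Int) (b : Int) (k : Int), Dom_solve a b k → Spec_solve a b k (solve a b k)

-- ===== LEMMAS AND PROOFS =====

-- membership in A's accumulated list: the union of the two closed intervals
theorem solve_mem_ans (a b k m : Int) :
    m ∈ (PySem.List.pyRange 0 k 1).foldl (fun ans i =>
      let ans := if a + i ≤ b then ans ++ [a + i] else ans
      if a ≤ b - i then ans ++ [b - i] else ans) ([] : List Int)
    ↔ (a ≤ m ∧ m ≤ a + k - 1 ∧ m ≤ b) ∨ (b - k + 1 ≤ m ∧ a ≤ m ∧ m ≤ b) := by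
  have hfun : (fun (ans : List Int) (i : Int) =>
      let ans := if a + i ≤ b then ans ++ [a + i] else ans
      if a ≤ b - i then ans ++ [b - i] else ans)
      = (fun ans i => ans ++ ((if a + i ≤ b then [a + i] else []) ++ (if a ≤ b - i then [b - i] else []))) := by
    funext acc i; simp only []; split_ifs <;> simp
  rw [hfun]
  rw [PySem.List.foldl_append_eq_flatMap]
  simp only [List.nil_append, List.mem_flatMap, PySem.List.mem_pyRange_one]
  constructor
  · rintro ⟨i, ⟨h0, hk⟩, hm⟩
    rw [List.mem_append] at hm
    rcases hm with hm | hm <;> split_ifs at hm <;> simp at hm <;> omega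
  · rintro (h | h)
    · exact ⟨m - a, by omega, by split_ifs <;> simp <;> omega⟩
    · exact ⟨b - m, by omega, by
        rw [List.mem_append]; right; split_ifs <;> simp <;> try omega⟩

theorem solve_alt_mem (a b k m : Int) :
    m ∈ solve_alt a b k
    ↔ (a ≤ m ∧ m ≤ a + k - 1 ∧ m ≤ b) ∨ (b - k + 1 ≤ m ∧ a ≤ m ∧ m ≤ b) := by
  unfold solve_alt
  simp only []
  split_ifs with h <;> simp only [List.mem_append, PySem.List.mem_pyRange_one] <;> omega

theorem solve_alt_pairwise (a b k : Int) : (solve_alt a b k).Pairwise (· < ·) := by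
  unfold solve_alt
  simp only []
  split_ifs with h
  · exact PySem.List.pairwise_lt_pyRange_one _ _
  · rw [List.pairwise_append]
    refine ⟨PySem.List.pairwise_lt_pyRange_one _ _, PySem.List.pairwise_lt_pyRange_one _ _, ?_⟩
    intro p hp q hq
    rw [PySem.List.mem_pyRange_one] at hp hq
    omega

theorem solve_alt_nodup (a b k : Int) : (solve_alt a b k).Nodup :=
  (solve_alt_pairwise a b k).imp (fun h => ne_of_lt h)

-- ===== VERDICT (by name: the statement is the Claim_ definition above) =====
theorem solve_spec : Claim_equal_solve := by
  intro a b k _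
  unfold Spec_solve solve
  apply PySem.List.sorted_eq_of_perm_of_pairwise_lt
  · rw [List.perm_ext_iff_of_nodup (solve_alt_nodup a b k) (PySem.Set.nodup_ofList _)]
    intro m
    rw [solve_alt_mem, PySem.Set.mem_ofList, solve_mem_ans]
  · exact solve_alt_pairwise a b k
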